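-- pv_equiv track=rewrite | github.com/Balizero1987/nuzantara | INTEL_SCRAPING/code/bali_zero_journal_generator.py | _parse_article_metadata
-- ===== SOURCE A (Python) =====
-- from typing import Dict, List, Any, Optional
--
-- def _parse_article_metadata(markdown_content: str) -> Dict[str, Any]:
--     """Parse metadata from markdown article"""
--     metadata = {}
--     lines = markdown_content.split('\n')
--
--     content_start = 0
--     in_metadata = False
--
--     for i, line in enumerate(lines):
--         line = line.strip()
--
--         # Title (first # heading)
--         if line.startswith('# ') and 'title' not in metadata:
--             metadata['title'] = line[2:].strip()
--
--         # Metadata fields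
--         elif line.startswith('**') and '**:' in line:
--             key = line.split('**')[1].split('**')[0].lower().replace(' ', '_')
--             value = line.split(':', 1)[1].strip()
--             metadata[key] = value
--
--         # Content section
--         elif line.startswith('## Content'):
--             content_start = i + 1
--             break
--
--     # Extract main content
--     if content_start > 0:
--         content_lines = lines[content_start:]
--         metadata['content'] = '\n'.join(content_lines).strip()
--     else:
--         metadata['content'] = markdown_content
--
--     return metadata
-- ===== SOURCE B (Python) =====
-- def _classify(raw):
--     """Map one line to a token: ('marker', None, None), ('heading', 'title', text),
--     ('field', key, value) or None (the three shapes are mutually exclusive)."""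
--     line = raw.strip()
--     if line.startswith('## Content'):
--         return ('marker', None, None)
--     if line.startswith('# '):
--         return ('heading', 'title', line[2:].strip())
--     if line.startswith('**') and '**:' in line:
--         key = line.split('**')[1].split('**')[0].lower().replace(' ', '_')
--         return ('field', key, line.split(':', 1)[1].strip())
--     return None
--
--
-- def _parse_article_metadata(markdown_content):
--     """Parse metadata from markdown article: tokenize every line once, cut the
--     token stream at the first marker, turn header tokens into (key, value)
--     pairs, then collapse the pairs into an ordered dict."""
--     lines = markdown_content.split('\n')
--     tokens = [_classify(l) for l in lines]
--
--     marker = ('marker', None, None)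
--     if marker in tokens:
--         m = tokens.index(marker)
--         head = tokens[:m]
--         content = '\n'.join(lines[m + 1:]).strip()
--     else:
--         head = tokens
--         content = markdown_content
--
--     pairs = []
--     titled = False
--     for t in head:
--         if t is None or t[0] == 'marker':
--             continue
--         kind, k, v = t
--         if kind == 'heading' and titled:
--             continue
--         pairs.append((k, v))
--         titled = titled or k == 'title'
--
--     metadata = {}
--     for k, v in pairs:
--         metadata[k] = v
--     metadata['content'] = content
--     return metadata
-- ===== Notes on version B (the rewrite author's own statement) =====
-- stated objective: alternative
-- what changed: B replaces A's single stateful break-loop by a tokenize-then-reduce pipeline: every line is classified once into a token, the token stream is cut at the first marker token, the header tokens are flattened into an ordered (key,value) pair list with a titled flag, and a generic ordered-dict collapse produces the result.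
import Mathlib
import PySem

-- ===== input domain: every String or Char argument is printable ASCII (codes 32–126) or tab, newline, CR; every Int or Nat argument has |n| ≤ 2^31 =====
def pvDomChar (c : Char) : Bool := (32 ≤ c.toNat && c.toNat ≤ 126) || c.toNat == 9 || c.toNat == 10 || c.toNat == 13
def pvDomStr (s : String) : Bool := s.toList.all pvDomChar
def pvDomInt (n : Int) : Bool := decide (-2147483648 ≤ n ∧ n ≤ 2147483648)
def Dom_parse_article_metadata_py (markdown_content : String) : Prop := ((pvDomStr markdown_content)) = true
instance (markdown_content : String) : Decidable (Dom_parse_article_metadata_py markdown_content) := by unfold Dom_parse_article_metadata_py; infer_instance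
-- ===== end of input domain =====

-- B replaces A's single stateful break-loop by a tokenize-then-reduce pipeline
-- (classify every line once, cut the token stream at the first marker token,
-- flatten header tokens to pairs, collapse pairs into an ordered dict);
-- alternative decomposition, same cost; equivalence of the RETURN value is proved.

-- ===== PORT A =====
-- A's loop over enumerate(lines) with its break: index carried explicitly,
-- break returns (metadata, i+1); falling off the end returns content_start = 0.
-- list[idx] after a guaranteed-successful split is ported as pyGet? + getD ""
-- (the default is unreachable where Python does not raise).
def pvALoop (lines : List String) (i : Nat) (md : PySem.Dict String String) :
    PySem.Dict String String × Nat :=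
  match lines with
  | [] => (md, 0)
  | l :: rest =>
    if PySem.Str.startswith (PySem.Str.strip l) "# " && !(md.contains "title") then
      pvALoop rest (i + 1) (md.insert "title"
        (PySem.Str.strip (PySem.Str.slice (PySem.Str.strip l) (some 2) none)))
    else if PySem.Str.startswith (PySem.Str.strip l) "**" &&
        PySem.Str.isIn "**:" (PySem.Str.strip l) then
      pvALoop rest (i + 1) (md.insert
        (PySem.Str.replace (PySem.Str.lower
          ((PySem.List.pyGet? ((PySem.Str.split?
            ((PySem.List.pyGet? ((PySem.Str.split? (PySem.Str.strip l) "**").getD []) 1).getD "")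
            "**").getD []) 0).getD "")) " " "_")
        (PySem.Str.strip ((PySem.List.pyGet?
          ((PySem.Str.splitMax? (PySem.Str.strip l) ":" 1).getD []) 1).getD "")))
    else if PySem.Str.startswith (PySem.Str.strip l) "## Content" then
      (md, i + 1)
    else
      pvALoop rest (i + 1) md

def parse_article_metadata_py (markdown_content : String) : List (String × String) :=
  let lines := (PySem.Str.split? markdown_content "\n").getD []
  let r := pvALoop lines 0 PySem.Dict.empty
  if r.2 > 0 then
    (r.1.insert "content" (PySem.Str.strip (PySem.Str.join "\n"
      (PySem.List.slice lines (some (r.2 : Int)) none)))).items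
  else
    (r.1.insert "content" markdown_content).items

-- ===== PORT B =====
-- Source B's token type: ('marker', None, None) / ('heading', 'title', t) / ('field', k, v) / None
inductive pvTok
  | marker
  | heading (t : String)
  | field (k v : String)
deriving DecidableEq

-- Source B's _classify: one line to a token
def pvClassify (raw : String) : Option pvTok :=
  if PySem.Str.startswith (PySem.Str.strip raw) "## Content" then some pvTok.marker
  else if PySem.Str.startswith (PySem.Str.strip raw) "# " then
    some (pvTok.heading (PySem.Str.strip (PySem.Str.slice (PySem.Str.strip raw) (some 2) none)))
  else if PySem.Str.startswith (PySem.Str.strip raw) "**" &&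
      PySem.Str.isIn "**:" (PySem.Str.strip raw) then
    some (pvTok.field
      (PySem.Str.replace (PySem.Str.lower
        ((PySem.List.pyGet? ((PySem.Str.split?
          ((PySem.List.pyGet? ((PySem.Str.split? (PySem.Str.strip raw) "**").getD []) 1).getD "")
          "**").getD []) 0).getD "")) " " "_")
      (PySem.Str.strip ((PySem.List.pyGet?
        ((PySem.Str.splitMax? (PySem.Str.strip raw) ":" 1).getD []) 1).getD "")))
  else none

-- Source B's pairs loop: header tokens + titled flag → (key, value) pair list
def pvPairs : List (Option pvTok) → Bool → List (String × String)
  | [], _ => []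
  | none :: rest, titled => pvPairs rest titled
  | some pvTok.marker :: rest, titled => pvPairs rest titled
  | some (pvTok.heading t) :: rest, titled =>
      if titled then pvPairs rest titled else ("title", t) :: pvPairs rest true
  | some (pvTok.field k v) :: rest, titled =>
      (k, v) :: pvPairs rest (titled || k == "title")

def parse_article_metadata_py_alt (markdown_content : String) : List (String × String) :=
  let lines := (PySem.Str.split? markdown_content "\n").getD []
  let tokens := lines.map pvClassify
  let r : List (String × String) × String :=
    match PySem.List.index? tokens (some pvTok.marker) with
    | none => (pvPairs tokens false, markdown_content)
    | some m => (pvPairs (tokens.take m) false,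
        PySem.Str.strip (PySem.Str.join "\n" (lines.drop (m + 1))))
  ((r.1.foldl (fun d p => d.insert p.1 p.2) PySem.Dict.empty).insert "content" r.2).items

-- ===== PRECONDITION & SPEC =====
def Spec_parse_article_metadata_py (markdown_content : String) (out : List (String × String)) : Prop := out = parse_article_metadata_py_alt markdown_content
instance (markdown_content : String) (out : List (String × String)) : Decidable (Spec_parse_article_metadata_py markdown_content out) := by unfold Spec_parse_article_metadata_py; infer_instance

-- ===== CLAIM (what is proved, stated in full; the proofs are below) =====
def Claim_equal_parse_article_metadata_py : Prop := ∀ (markdown_content : String), Dom_parse_article_metadata_py markdown_content → Spec_parse_article_metadata_py markdown_content (parse_article_metadata_py markdown_content)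

-- ===== LEMMAS AND PROOFS =====

-- the marker test, and one step of A's loop body, as proof-layer abbreviations
def pvMarker (l : String) : Bool := PySem.Str.startswith (PySem.Str.strip l) "## Content"

def pvStep (md : PySem.Dict String String) (raw : String) : PySem.Dict String String :=
  if PySem.Str.startswith (PySem.Str.strip raw) "# " && !(md.contains "title") then
    md.insert "title" (PySem.Str.strip (PySem.Str.slice (PySem.Str.strip raw) (some 2) none))
  else if PySem.Str.startswith (PySem.Str.strip raw) "**" &&
      PySem.Str.isIn "**:" (PySem.Str.strip raw) then
    md.insert
      (PySem.Str.replace (PySem.Str.lower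
        ((PySem.List.pyGet? ((PySem.Str.split?
          ((PySem.List.pyGet? ((PySem.Str.split? (PySem.Str.strip raw) "**").getD []) 1).getD "")
          "**").getD []) 0).getD "")) " " "_")
      (PySem.Str.strip ((PySem.List.pyGet?
        ((PySem.Str.splitMax? (PySem.Str.strip raw) ":" 1).getD []) 1).getD ""))
  else md

-- a stripped line starting with '## Content' starts with neither '# ' nor '**'
lemma pvNotHash (t : String) (h : PySem.Str.startswith t "## Content" = true) :
    PySem.Str.startswith t "# " = false := by
  simp only [PySem.Str.startswith_eq] at h ⊢
  rw [PySem.Chars.startswith_iff] at h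
  by_contra hb
  rw [Bool.not_eq_false, PySem.Chars.startswith_iff] at hb
  have := List.prefix_of_prefix_length_le hb h (by decide)
  exact absurd this (by decide)

lemma pvNotStars (t : String) (h : PySem.Str.startswith t "## Content" = true) :
    PySem.Str.startswith t "**" = false := by
  simp only [PySem.Str.startswith_eq] at h ⊢
  rw [PySem.Chars.startswith_iff] at h
  by_contra hb
  rw [Bool.not_eq_false, PySem.Chars.startswith_iff] at hb
  have := List.prefix_of_prefix_length_le hb h (by decide)
  exact absurd this (by decide)

-- a stripped line starting with '# ' does not start with '**'
lemma pvHashNotStars (t : String) (h : PySem.Str.startswith t "# " = true) :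
    PySem.Str.startswith t "**" = false := by
  simp only [PySem.Str.startswith_eq] at h ⊢
  rw [PySem.Chars.startswith_iff] at h
  by_contra hb
  rw [Bool.not_eq_false, PySem.Chars.startswith_iff] at hb
  have := List.prefix_of_prefix_length_le hb h (by decide)
  exact absurd this (by decide)

lemma pvALoop_break (l : String) (rest : List String) (i : Nat) (md : PySem.Dict String String)
    (h : PySem.Str.startswith (PySem.Str.strip l) "## Content" = true) :
    pvALoop (l :: rest) i md = (md, i + 1) := by
  simp only [pvALoop, pvNotHash _ h, pvNotStars _ h, h, Bool.false_and, Bool.false_eq_true,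
    if_false, if_true]

lemma pvALoop_step (l : String) (rest : List String) (i : Nat) (md : PySem.Dict String String)
    (h : PySem.Str.startswith (PySem.Str.strip l) "## Content" = false) :
    pvALoop (l :: rest) i md = pvALoop rest (i + 1) (pvStep md l) := by
  simp only [pvALoop, pvStep, h, Bool.false_eq_true, if_false]
  split_ifs <;> rfl

-- A's break-loop, characterised by the position of the first marker line
lemma pvALoop_eq (lines : List String) (i : Nat) (md : PySem.Dict String String) :
    pvALoop lines i md =
      match lines.findIdx? pvMarker with
      | none => (lines.foldl pvStep md, 0)
      | some j => ((lines.take j).foldl pvStep md, i + j + 1) := by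
  induction lines generalizing i md with
  | nil => simp [pvALoop]
  | cons l rest ih =>
    cases hp : pvMarker l with
    | true =>
      have hs : PySem.Str.startswith (PySem.Str.strip l) "## Content" = true := hp
      rw [pvALoop_break _ _ _ _ hs, List.findIdx?_cons, hp]
      simp only [if_true, List.take_zero, List.foldl_nil, Nat.add_zero]
    | false =>
      have hs : PySem.Str.startswith (PySem.Str.strip l) "## Content" = false := hp
      rw [pvALoop_step _ _ _ _ hs, ih, List.findIdx?_cons, hp]
      simp only [Bool.false_eq_true, if_false]
      cases hfi : rest.findIdx? pvMarker with
      | none => simp only [Option.map_none, List.foldl_cons]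
      | some j =>
        simp only [Option.map_some, List.take_succ_cons, List.foldl_cons, Prod.mk.injEq]
        exact ⟨trivial, by omega⟩

-- the classification is a marker token exactly on marker lines
lemma pvClassify_marker (l : String) :
    (pvClassify l = some pvTok.marker) ↔ pvMarker l = true := by
  unfold pvClassify pvMarker
  by_cases h : PySem.Str.startswith (PySem.Str.strip l) "## Content" = true
  · simp only [h, if_true]
  · rw [Bool.not_eq_true] at h
    simp only [h, Bool.false_eq_true, if_false]
    split_ifs <;> simp only [Option.some.injEq] <;>
      exact iff_of_false (fun h => nomatch h) id

-- the marker index of the token stream is the first marker line's index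
lemma pvIdx_eq (lines : List String) :
    PySem.List.index? (lines.map pvClassify) (some pvTok.marker) =
      lines.findIdx? pvMarker := by
  induction lines with
  | nil => simp [PySem.List.index?]
  | cons l rest ih =>
    rw [List.map_cons, List.findIdx?_cons]
    by_cases hp : pvMarker l = true
    · rw [(pvClassify_marker l).mpr hp, PySem.List.index?_cons_self, hp, if_pos rfl]
    · have hne : pvClassify l ≠ some pvTok.marker := fun h => hp ((pvClassify_marker l).mp h)
      rw [PySem.List.index?_cons_of_ne _ hne, ih]
      simp [hp]

-- one step of A's loop on a non-marker line, against its classification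
lemma pvStep_classify (d : PySem.Dict String String) (l : String)
    (hm : pvMarker l = false) :
    pvStep d l =
      match pvClassify l with
      | none => d
      | some pvTok.marker => d
      | some (pvTok.heading t) => if d.contains "title" then d else d.insert "title" t
      | some (pvTok.field k v) => d.insert k v := by
  unfold pvMarker at hm
  unfold pvStep pvClassify
  simp only [hm, Bool.false_eq_true, if_false]
  by_cases h1 : PySem.Str.startswith (PySem.Str.strip l) "# " = true
  · have h2 := pvHashNotStars _ h1
    by_cases hc : d.contains "title" = true
    · simp only [h1, hc, h2, Bool.not_true, Bool.and_false, Bool.false_and,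
        Bool.false_eq_true, if_false, if_true]
    · rw [Bool.not_eq_true] at hc
      simp only [h1, hc, Bool.not_false, Bool.and_true, if_true,
        Bool.false_eq_true, if_false]
  · rw [Bool.not_eq_true] at h1
    simp only [h1, Bool.false_and, Bool.false_eq_true, if_false]
    by_cases h2 : (PySem.Str.startswith (PySem.Str.strip l) "**" &&
        PySem.Str.isIn "**:" (PySem.Str.strip l)) = true
    · simp only [h2, if_true]
    · rw [Bool.not_eq_true] at h2
      simp only [h2, Bool.false_eq_true, if_false]

-- folding A's step over marker-free lines = collapsing B's pair list
lemma pvFold_pairs (lines : List String) (d : PySem.Dict String String)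
    (hm : ∀ l ∈ lines, pvMarker l = false) :
    lines.foldl pvStep d =
      (pvPairs (lines.map pvClassify) (d.contains "title")).foldl
        (fun d p => d.insert p.1 p.2) d := by
  induction lines generalizing d with
  | nil => rfl
  | cons l rest ih =>
    have hml : pvMarker l = false := hm l (List.mem_cons_self)
    have hmr : ∀ x ∈ rest, pvMarker x = false := fun x hx => hm x (List.mem_cons_of_mem _ hx)
    rw [List.map_cons, List.foldl_cons, pvStep_classify d l hml]
    cases hc : pvClassify l with
    | none => simp only [pvPairs]; exact ih d hmr
    | some t =>
      cases t with
      | marker => simp only [pvPairs]; exact ih d hmr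
      | heading s =>
        by_cases hct : d.contains "title" = true
        · simp only [pvPairs, hct, if_pos]
          rw [ih d hmr, hct]
        · simp only [pvPairs, hct, Bool.false_eq_true, if_false, List.foldl_cons]
          rw [ih _ hmr, PySem.Dict.contains_insert_self]
      | field k v =>
        simp only [pvPairs, List.foldl_cons]
        rw [ih _ hmr, PySem.Dict.contains_insert]
        have hbc : (("title" : String) == k) = (k == "title") := by
          by_cases hk : k = "title"
          · simp [hk]
          · simp [hk, Ne.symm hk]
        rw [hbc, Bool.or_comm]
  
-- no line strictly before the first marker line is a marker line
lemma pvTake_no_marker (lines : List String) (m : Nat)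
    (h : lines.findIdx? pvMarker = some m) :
    ∀ l ∈ lines.take m, pvMarker l = false := by
  induction lines generalizing m with
  | nil => simp at h
  | cons a t ih =>
    rw [List.findIdx?_cons] at h
    by_cases hp : pvMarker a = true
    · rw [if_pos hp] at h
      obtain rfl : (0 : Nat) = m := Option.some_injective _ h
      simp
    · rw [if_neg hp] at h
      cases hf : t.findIdx? pvMarker with
      | none => rw [hf] at h; simp at h
      | some j =>
        rw [hf] at h
        simp only [Option.map_some] at h
        obtain rfl : j + 1 = m := Option.some_injective _ h
        intro l hl
        rw [List.take_succ_cons] at hl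
        rcases List.mem_cons.mp hl with rfl | hl
        · simpa using hp
        · exact ih j hf l hl

-- ===== VERDICT (by name: the statement is the Claim_ definition above) =====
theorem parse_article_metadata_py_spec : Claim_equal_parse_article_metadata_py := by
  intro s _
  unfold Spec_parse_article_metadata_py
  simp only [parse_article_metadata_py, parse_article_metadata_py_alt]
  rw [pvALoop_eq, pvIdx_eq]
  cases hfi : ((PySem.Str.split? s "\n").getD []).findIdx? pvMarker with
  | none =>
    have hm : ∀ l ∈ (PySem.Str.split? s "\n").getD [], pvMarker l = false := by
      intro l hl
      have := List.findIdx?_eq_none_iff.mp hfi l hl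
      simpa using this
    simp only [if_neg (by omega : ¬ (0 : Nat) > 0)]
    rw [pvFold_pairs _ _ hm, PySem.Dict.contains_empty]
  | some j =>
    simp only [Nat.zero_add]
    rw [if_pos (Nat.succ_pos j)]
    rw [PySem.List.slice_from _ (by exact_mod_cast Nat.zero_le (j + 1))]
    simp only [Int.toNat_natCast]
    rw [pvFold_pairs _ _ (pvTake_no_marker _ _ hfi), PySem.Dict.contains_empty,
      List.map_take]
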